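-- pv_equiv track=rewrite | github.com/mscho2014/conversion | merge_cretin_v1.1.py | _parse_sections_from_lines
-- ===== SOURCE A (Python) =====
-- def _parse_sections_from_lines(lines):
--     sections = {}
--     cur = None
--     for ln in lines:
--         s = ln.strip()
--         if s.startswith('data '):
--             cur = s[5:].strip()
--             sections[cur] = [ln]
--             continue
--         if cur is not None:
--             sections[cur].append(ln)
--             if s == 'end data':
--                 cur = None
--     return sections
-- ===== SOURCE B (Python) =====
-- def _parse_sections_from_lines(lines):
--     headers = [(i, ln) for i, ln in enumerate(lines) if ln.strip().startswith('data ')]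
--     sections = {}
--     for i, ln in headers:
--         name = ln.strip()[5:].strip()
--         sec = [ln]
--         for nxt in lines[i + 1:]:
--             t = nxt.strip()
--             if t.startswith('data '):
--                 break
--             sec.append(nxt)
--             if t == 'end data':
--                 break
--         sections[name] = sec
--     return sections
-- ===== Notes on version B (the rewrite author's own statement) =====
-- stated objective: alternative
-- what changed: A is a single pass with a mutable 'current section' state threaded through the loop; B first collects the indices of all 'data ' header lines, then extracts each section's block independently by scanning forward from its header, so no cross-iteration state is kept.
import Mathlib
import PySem

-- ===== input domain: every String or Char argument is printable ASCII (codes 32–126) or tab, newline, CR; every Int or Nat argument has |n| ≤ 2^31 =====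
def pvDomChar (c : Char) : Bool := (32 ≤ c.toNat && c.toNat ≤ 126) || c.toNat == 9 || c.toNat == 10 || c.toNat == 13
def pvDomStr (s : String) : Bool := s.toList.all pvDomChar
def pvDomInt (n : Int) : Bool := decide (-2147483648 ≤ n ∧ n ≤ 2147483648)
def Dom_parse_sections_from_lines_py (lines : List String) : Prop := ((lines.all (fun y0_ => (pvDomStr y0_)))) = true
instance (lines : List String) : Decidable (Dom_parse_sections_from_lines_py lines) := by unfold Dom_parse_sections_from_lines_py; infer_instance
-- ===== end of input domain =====

-- B replaces A's one-pass mutable-state machine by a two-pass decomposition (collect header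
-- indices, then extract each section's block independently); objective: alternative (same cost).

-- ===== PORT A =====
-- one fold step of A's loop: state = (sections dict, current section name or none)
def pvStepA (st : PySem.Dict String (List String) × Option String) (ln : String) :
    PySem.Dict String (List String) × Option String :=
  let s := PySem.Str.strip ln
  if PySem.Str.startswith s "data " then
    let cur := PySem.Str.strip (PySem.Str.slice s (some 5) none)
    (st.1.insert cur [ln], some cur)
  else
    match st.2 with
    | none => st
    | some cur =>
      let d := st.1.modify cur [] (fun xs => xs ++ [ln])
      if s == "end data" then (d, none) else (d, some cur)

def parse_sections_from_lines_py (lines : List String) : List (String × List String) :=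
  (lines.foldl pvStepA (PySem.Dict.empty, none)).1.items

-- ===== PORT B =====
def pvIsHeader (ln : String) : Bool := PySem.Str.startswith (PySem.Str.strip ln) "data "

def pvName (ln : String) : String :=
  PySem.Str.strip (PySem.Str.slice (PySem.Str.strip ln) (some 5) none)

-- B's inner loop: the body lines following a header (stop before the next header,
-- stop after an 'end data' line)
def pvCollect : List String → List String
  | [] => []
  | ln :: rest =>
    if pvIsHeader ln then []
    else if PySem.Str.strip ln == "end data" then [ln]
    else ln :: pvCollect rest

def parse_sections_from_lines_py_alt (lines : List String) : List (String × List String) :=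
  (((PySem.List.enumerate lines).filter (fun p => pvIsHeader p.2)).foldl
    (fun d p =>
      d.insert (pvName p.2) (p.2 :: pvCollect (PySem.List.slice lines (some (p.1 + 1)) none)))
    PySem.Dict.empty).items

-- ===== PRECONDITION & SPEC =====
def Spec_parse_sections_from_lines_py (lines : List String) (out : List (String × List String)) : Prop := out = parse_sections_from_lines_py_alt lines
instance (lines : List String) (out : List (String × List String)) : Decidable (Spec_parse_sections_from_lines_py lines out) := by unfold Spec_parse_sections_from_lines_py; infer_instance

-- ===== CLAIM (what is proved, stated in full; the proofs are below) =====
def Claim_equal_parse_sections_from_lines_py : Prop := ∀ (lines : List String), Dom_parse_sections_from_lines_py lines → Spec_parse_sections_from_lines_py lines (parse_sections_from_lines_py lines)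

-- ===== LEMMAS AND PROOFS =====

-- canonical recursive form both ports are reduced to
def pvRunB : List String → PySem.Dict String (List String) → PySem.Dict String (List String)
  | [], d => d
  | ln :: rest, d =>
    if pvIsHeader ln then pvRunB rest (d.insert (pvName ln) (ln :: pvCollect rest))
    else pvRunB rest d

theorem pv_insert_insert_self {κ ν : Type} [BEq κ] [LawfulBEq κ] (d : PySem.Dict κ ν) (k : κ) (v w : ν) :
    (d.insert k v).insert k w = d.insert k w := by
  apply PySem.Dict.ext
  rw [PySem.Dict.items_insert_of_contains _ _ (PySem.Dict.contains_insert_self ..)]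
  by_cases h : d.contains k
  · rw [PySem.Dict.items_insert_of_contains _ _ h, PySem.Dict.items_insert_of_contains _ _ h,
      List.map_map]
    apply List.map_congr_left; intro p _
    by_cases hp : p.1 = k <;> simp [hp]
  · rw [PySem.Dict.items_insert_of_not_contains _ _ (by simpa using h),
      PySem.Dict.items_insert_of_not_contains _ _ (by simpa using h)]
    have hk : ∀ p ∈ d.items, (p.1 == k) = false := by
      intro p hp
      by_contra hc
      refine h ?_
      simp only [PySem.Dict.contains, List.any_eq_true]
      exact ⟨p, hp, by simpa using hc⟩
    simp only [List.map_append]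
    congr 1
    · refine (List.map_congr_left ?_).trans (List.map_id _)
      intro p hp; simp [hk p hp]
    · simp

theorem pv_modify_insert_self {κ ν : Type} [BEq κ] [LawfulBEq κ] (d : PySem.Dict κ ν) (k : κ) (v : ν) (d0 : ν) (f : ν → ν) :
    (d.insert k v).modify k d0 f = d.insert k (f v) := by
  show (d.insert k v).insert k (f ((d.insert k v).getD k d0)) = d.insert k (f v)
  rw [PySem.Dict.getD_insert_self, pv_insert_insert_self]

-- how one step of A's loop acts, by case
theorem pvStepA_header (d : PySem.Dict String (List String)) (c : Option String) (ln : String)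
    (h : pvIsHeader ln = true) :
    pvStepA (d, c) ln = (d.insert (pvName ln) [ln], some (pvName ln)) := by
  have h' : PySem.Str.startswith (PySem.Str.strip ln) "data " = true := h
  simp only [pvStepA, pvName, h', if_true]

theorem pvStepA_skip (d : PySem.Dict String (List String)) (ln : String)
    (h : pvIsHeader ln = false) :
    pvStepA (d, none) ln = (d, none) := by
  have h' : PySem.Str.startswith (PySem.Str.strip ln) "data " = false := h
  simp only [pvStepA, h', Bool.false_eq_true, if_false]

theorem pvStepA_end (d : PySem.Dict String (List String)) (n ln : String)
    (h : pvIsHeader ln = false) (he : (PySem.Str.strip ln == "end data") = true) :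
    pvStepA (d, some n) ln = (d.modify n [] (fun xs => xs ++ [ln]), none) := by
  have h' : PySem.Str.startswith (PySem.Str.strip ln) "data " = false := h
  simp only [pvStepA, h', Bool.false_eq_true, if_false, he, if_true]

theorem pvStepA_cont (d : PySem.Dict String (List String)) (n ln : String)
    (h : pvIsHeader ln = false) (he : (PySem.Str.strip ln == "end data") = false) :
    pvStepA (d, some n) ln = (d.modify n [] (fun xs => xs ++ [ln]), some n) := by
  have h' : PySem.Str.startswith (PySem.Str.strip ln) "data " = false := h
  simp only [pvStepA, h', Bool.false_eq_true, if_false, he]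

-- A's fold equals pvRunB (joint invariant for the idle and in-section states)
theorem pv_foldA_runB (lines : List String) :
    (∀ (d : PySem.Dict String (List String)),
        (lines.foldl pvStepA (d, none)).1 = pvRunB lines d) ∧
    (∀ (d : PySem.Dict String (List String)) (name : String) (acc : List String),
        (lines.foldl pvStepA (d.insert name acc, some name)).1
          = pvRunB lines (d.insert name (acc ++ pvCollect lines))) := by
  induction lines with
  | nil => exact ⟨fun d => rfl, fun d name acc => by simp [pvRunB, pvCollect]⟩
  | cons ln rest ih =>
    constructor
    · intro d
      cases h : pvIsHeader ln with
      | true =>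
        rw [List.foldl_cons, pvStepA_header d none ln h]
        rw [ih.2 d (pvName ln) [ln]]
        simp only [pvRunB, h, if_true, List.singleton_append]
      | false =>
        rw [List.foldl_cons, pvStepA_skip d ln h, ih.1 d]
        simp only [pvRunB, h, Bool.false_eq_true, if_false]
    · intro d name acc
      cases h : pvIsHeader ln with
      | true =>
        rw [List.foldl_cons, pvStepA_header _ _ ln h]
        rw [ih.2 (d.insert name acc) (pvName ln) [ln]]
        simp only [pvRunB, pvCollect, h, if_true, List.append_nil, List.singleton_append]
      | false =>
        cases he : (PySem.Str.strip ln == "end data") with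
        | true =>
          rw [List.foldl_cons, pvStepA_end _ name ln h he, pv_modify_insert_self,
            ih.1 (d.insert name (acc ++ [ln]))]
          simp only [pvRunB, pvCollect, h, Bool.false_eq_true, if_false, he, if_true]
        | false =>
          rw [List.foldl_cons, pvStepA_cont _ name ln h he, pv_modify_insert_self,
            ih.2 d name (acc ++ [ln])]
          simp only [pvRunB, pvCollect, h, Bool.false_eq_true, if_false, he,
            List.append_assoc, List.singleton_append]

theorem pv_enum_shift {α : Type} (xs : List α) (s : Int) :
    PySem.List.enumerate xs (s + 1) = (PySem.List.enumerate xs s).map (fun p => (p.1 + 1, p.2)) := by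
  induction xs generalizing s with
  | nil => simp [PySem.List.enumerate_nil]
  | cons x xs ih => simp [PySem.List.enumerate_cons, ih]

-- B's two-pass fold equals pvRunB
theorem pv_foldB_runB (lines : List String) : ∀ (d : PySem.Dict String (List String)),
    ((PySem.List.enumerate lines).filter (fun p => pvIsHeader p.2)).foldl
      (fun d p =>
        d.insert (pvName p.2) (p.2 :: pvCollect (PySem.List.slice lines (some (p.1 + 1)) none)))
      d = pvRunB lines d := by
  induction lines with
  | nil => intro d; simp [PySem.List.enumerate_nil, pvRunB]
  | cons ln rest ih =>
    intro d
    rw [PySem.List.enumerate_cons]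
    have h1 : PySem.List.enumerate rest (0 + 1) = (PySem.List.enumerate rest 0).map (fun p => (p.1 + 1, p.2)) :=
      pv_enum_shift rest 0
    rw [h1, List.filter_cons]
    have key : ∀ (d' : PySem.Dict String (List String)),
        (((PySem.List.enumerate rest 0).map (fun p => (p.1 + 1, p.2))).filter (fun p => pvIsHeader p.2)).foldl
          (fun d p =>
            d.insert (pvName p.2) (p.2 :: pvCollect (PySem.List.slice (ln :: rest) (some (p.1 + 1)) none)))
          d' = pvRunB rest d' := by
      intro d'
      rw [List.filter_map, List.foldl_map]
      rw [PySem.List.foldl_congr_mem _ _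
        (fun d p =>
          d.insert (pvName p.2) (p.2 :: pvCollect (PySem.List.slice rest (some (p.1 + 1)) none))) d' ?_]
      · exact ih d'
      · intro acc p hp
        have hp' : p ∈ PySem.List.enumerate rest 0 := List.mem_of_mem_filter hp
        obtain ⟨k, hk, rfl⟩ := (PySem.List.mem_enumerate_iff _ _ _).1 hp'
        simp only [zero_add]
        have e1 : PySem.List.slice (ln :: rest) (some ((k : Int) + 1 + 1)) none = List.drop (k + 1) rest := by
          have e : ((k : Int) + 1 + 1) = ((k + 2 : Nat) : Int) := by push_cast; ring
          rw [e, PySem.List.slice_from_natCast]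
          rfl
        have e2 : PySem.List.slice rest (some ((k : Int) + 1)) none = List.drop (k + 1) rest := by
          have e : ((k : Int) + 1) = ((k + 1 : Nat) : Int) := by push_cast; ring
          rw [e, PySem.List.slice_from_natCast]
        rw [e1, e2]
    cases h : pvIsHeader ln with
    | true =>
      simp only [if_true, List.foldl_cons]
      have e0 : PySem.List.slice (ln :: rest) (some ((0 : Int) + 1)) none = rest := by
        have e : ((0 : Int) + 1) = ((1 : Nat) : Int) := by norm_num
        rw [e, PySem.List.slice_from_natCast]
        rfl
      rw [e0] at *
      rw [key]
      simp only [pvRunB, h, if_true]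
    | false =>
      simp only [Bool.false_eq_true, if_false]
      rw [key]
      simp only [pvRunB, h, Bool.false_eq_true, if_false]

-- ===== VERDICT (by name: the statement is the Claim_ definition above) =====
theorem parse_sections_from_lines_py_spec : Claim_equal_parse_sections_from_lines_py := by
  intro lines _
  show parse_sections_from_lines_py lines = parse_sections_from_lines_py_alt lines
  unfold parse_sections_from_lines_py parse_sections_from_lines_py_alt
  rw [(pv_foldA_runB lines).1 PySem.Dict.empty, pv_foldB_runB lines PySem.Dict.empty]
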